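-- pv_equiv track=rewrite | github.com/aws-samples/amazon-textract-a2i-pdf | deploy_code/multipagepdfa2i_humancomplete/clean_data.py | get_child
-- ===== SOURCE A (Python) =====
-- def get_child(relation, line, word):
--     text = ""
--     for id in relation["ids"]:
--         if id in line:
--             text = line[id]
--         else:
--             text += " " + word[id]
--     if text[0] == " ":
--         text = text[1:]
--     return text
-- ===== SOURCE B (Python) =====
-- def get_child(relation, line, word):
--     # Scan ids from the right: a line hit overwrites everything before it, so
--     # stop at the last id present in line and build only the suffix of words.
--     ids = relation["ids"]
--     parts = []
--     base = ""
--     for id in reversed(ids):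
--         if id in line:
--             base = line[id]
--             break
--         parts.append(" " + word[id])
--     text = base + "".join(reversed(parts))
--     if text[0] == " ":
--         text = text[1:]
--     return text
-- ===== Notes on version B (the rewrite author's own statement) =====
-- stated objective: alternative
-- what changed: A folds forward over all ids letting each line hit overwrite the accumulator; B scans ids from the right, stops at the last id present in line, and builds only that line value plus the suffix of ' '+word pieces (joined), so work before the last line hit is skipped.
import Mathlib
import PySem

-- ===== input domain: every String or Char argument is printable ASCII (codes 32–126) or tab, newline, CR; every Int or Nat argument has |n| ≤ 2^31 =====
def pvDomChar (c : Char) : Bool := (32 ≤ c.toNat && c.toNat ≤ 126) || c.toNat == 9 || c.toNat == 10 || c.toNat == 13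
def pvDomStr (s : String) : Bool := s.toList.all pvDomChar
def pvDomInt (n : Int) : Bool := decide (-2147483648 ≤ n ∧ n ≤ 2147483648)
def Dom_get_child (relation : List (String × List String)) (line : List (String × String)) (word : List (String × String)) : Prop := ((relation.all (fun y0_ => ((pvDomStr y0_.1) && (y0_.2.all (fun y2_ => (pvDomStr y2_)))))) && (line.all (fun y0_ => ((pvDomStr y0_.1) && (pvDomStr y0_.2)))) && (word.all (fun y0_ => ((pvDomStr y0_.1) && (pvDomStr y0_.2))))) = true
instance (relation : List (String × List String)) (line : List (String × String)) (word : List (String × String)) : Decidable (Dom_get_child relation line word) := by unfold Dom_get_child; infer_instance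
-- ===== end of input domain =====

-- B scans ids from the right and stops at the last id present in line (a line hit
-- overwrites A's accumulator, so everything before it is dead work); same return value.

-- ===== PORT A =====
def get_child (relation : List (String × List String)) (line : List (String × String)) (word : List (String × String)) : String :=
  let ids := ((PySem.Dict.mk relation).get? "ids").getD []
  let text := ids.foldl (fun text id =>
      match (PySem.Dict.mk line).get? id with
      | some v => v
      | none => text ++ " " ++ ((PySem.Dict.mk word).get? id).getD "") ""
  if PySem.Str.pyGet? text 0 = some ' ' then PySem.Str.slice text (some 1) none else text

-- ===== PORT B =====
-- the reversed() loop of Source B: collect ' '+word[id] parts until the first id found in line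
def gcLoop (line : List (String × String)) (word : List (String × String)) :
    List String → List String → String × List String
  | [], parts => ("", parts)
  | id :: rest, parts =>
    match (PySem.Dict.mk line).get? id with
    | some v => (v, parts)
    | none => gcLoop line word rest (parts ++ [" " ++ ((PySem.Dict.mk word).get? id).getD ""])

def get_child_alt (relation : List (String × List String)) (line : List (String × String)) (word : List (String × String)) : String :=
  let ids := ((PySem.Dict.mk relation).get? "ids").getD []
  let bp := gcLoop line word ids.reverse []
  let text := bp.1 ++ PySem.Str.join "" bp.2.reverse
  if PySem.Str.pyGet? text 0 = some ' ' then PySem.Str.slice text (some 1) none else text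

-- ===== PRECONDITION & SPEC =====
-- Pre_ excludes exactly the inputs where the Python A raises: a missing "ids" key or an
-- id in neither line nor word (KeyError), and a final text that is empty — ids empty, or
-- the last id mapped by line to "" (IndexError on text[0]).
def Pre_get_child (relation : List (String × List String)) (line : List (String × String)) (word : List (String × String)) : Prop :=
  ((PySem.Dict.mk relation).get? "ids").isSome = true ∧
  (let ids := ((PySem.Dict.mk relation).get? "ids").getD [];
   ids ≠ [] ∧
   (∀ id ∈ ids, (((PySem.Dict.mk line).get? id).isSome || ((PySem.Dict.mk word).get? id).isSome) = true) ∧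
   (PySem.Dict.mk line).get? (ids.getLast?.getD "") ≠ some "")
instance (relation : List (String × List String)) (line : List (String × String)) (word : List (String × String)) : Decidable (Pre_get_child relation line word) := by unfold Pre_get_child; infer_instance

def pvWitness_get_child : (List (String × List String)) × (List (String × String)) × (List (String × String)) :=
  ([("ids", ["a", "b"])], [("a", "A")], [("b", "bee")])

def Spec_get_child (relation : List (String × List String)) (line : List (String × String)) (word : List (String × String)) (out : String) : Prop := out = get_child_alt relation line word
instance (relation : List (String × List String)) (line : List (String × String)) (word : List (String × String)) (out : String) : Decidable (Spec_get_child relation line word out) := by unfold Spec_get_child; infer_instance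

-- ===== CLAIM (what is proved, stated in full; the proofs are below) =====
def Claim_equal_get_child : Prop := ∀ (relation : List (String × List String)) (line : List (String × String)) (word : List (String × String)), Dom_get_child relation line word → Pre_get_child relation line word → Spec_get_child relation line word (get_child relation line word)

-- ===== LEMMAS AND PROOFS =====

theorem join_empty_cons (x : String) (l : List String) :
    PySem.Str.join "" (x :: l) = x ++ PySem.Str.join "" l := by
  cases l with
  | nil => simp [PySem.Str.join, PySem.Chars.join_singleton, PySem.Chars.join_nil]
  | cons y r => simp [PySem.Str.join, PySem.Chars.join_cons_cons]

-- invariant of Source B's reversed scan against A's forward fold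
theorem gcLoop_spec (line word : List (String × String)) (l parts : List String) :
    (gcLoop line word l parts).1 ++ PySem.Str.join "" (gcLoop line word l parts).2.reverse
      = l.reverse.foldl (fun text id =>
          match (PySem.Dict.mk line).get? id with
          | some v => v
          | none => text ++ " " ++ ((PySem.Dict.mk word).get? id).getD "") ""
        ++ PySem.Str.join "" parts.reverse := by
  induction l generalizing parts with
  | nil => simp [gcLoop]
  | cons a rest ih =>
    simp only [gcLoop, List.reverse_cons, List.foldl_append, List.foldl_cons, List.foldl_nil]
    cases h : (PySem.Dict.mk line).get? a with
    | some v => simp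
    | none =>
      rw [ih]
      simp [join_empty_cons, String.append_assoc]

-- ===== VERDICT (by name: the statement is the Claim_ definition above) =====
theorem get_child_spec : Claim_equal_get_child := by
  intro relation line word _ _
  unfold Spec_get_child get_child get_child_alt
  have h := gcLoop_spec line word (((PySem.Dict.mk relation).get? "ids").getD []).reverse []
  simp only [List.reverse_reverse] at h
  simp only [h]
  simp [PySem.Str.join, PySem.Chars.join_nil]
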